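-- pv_equiv track=rewrite | github.com/mramanindia/personal-ai-agent | main.py | chunk_by_headings
-- ===== SOURCE A (Python) =====
-- def chunk_by_headings(data, max_chunk_size=500):
--     chunks = []
--     for section in data:
--         heading = section["heading"]
--         content = section["content"]
--         words = content.split()
--         for i in range(0, len(words), max_chunk_size):
--             chunk = " ".join(words[i:i + max_chunk_size])
--             chunks.append(f"{heading}\n{chunk}")
--     return chunks
-- ===== SOURCE B (Python) =====
-- def chunk_by_headings(data, max_chunk_size=500):
--     if max_chunk_size <= 0:
--         raise ValueError("max_chunk_size must be a positive integer")
--     chunks = []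
--     for section in data:
--         heading = section["heading"]
--         buf = []
--         for word in section["content"].split():
--             buf.append(word)
--             if len(buf) == max_chunk_size:
--                 chunks.append(heading + "\n" + " ".join(buf))
--                 buf = []
--         if buf:
--             chunks.append(heading + "\n" + " ".join(buf))
--     return chunks
-- ===== Notes on version B (the rewrite author's own statement) =====
-- stated objective: alternative
-- what changed: Replaces the index-arithmetic loop (range stepping by max_chunk_size plus list slicing) with a single pass over the words that accumulates a buffer, emits a heading-prefixed chunk whenever the buffer fills, and flushes the remainder; B also validates max_chunk_size up front.
-- outside the precondition, e.g. on chunk_by_headings([{'heading': 'h', 'content': 'a b'}], -1): A returns [], B raises ValueError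
import Mathlib
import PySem

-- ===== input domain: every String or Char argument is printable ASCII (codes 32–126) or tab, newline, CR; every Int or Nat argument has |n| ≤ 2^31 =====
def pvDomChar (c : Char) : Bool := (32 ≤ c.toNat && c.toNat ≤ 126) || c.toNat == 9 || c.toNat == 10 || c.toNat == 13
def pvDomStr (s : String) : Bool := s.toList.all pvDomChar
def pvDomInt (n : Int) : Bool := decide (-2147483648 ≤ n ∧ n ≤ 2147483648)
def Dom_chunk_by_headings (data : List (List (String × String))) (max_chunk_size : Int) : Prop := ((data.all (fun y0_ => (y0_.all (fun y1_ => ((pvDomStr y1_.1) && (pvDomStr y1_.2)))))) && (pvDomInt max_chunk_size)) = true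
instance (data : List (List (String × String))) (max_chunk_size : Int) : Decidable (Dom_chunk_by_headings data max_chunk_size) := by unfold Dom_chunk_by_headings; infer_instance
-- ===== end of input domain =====

-- B replaces A's index-arithmetic loop (range stepped by max_chunk_size + slicing) with a single
-- buffered pass over the words (emit when the buffer fills, flush the remainder); same cost.

-- ===== PORT A =====
def chunk_by_headings (data : List (List (String × String))) (max_chunk_size : Int) : List String :=
  data.foldl (fun chunks sect =>
    -- section["heading"] / section["content"]: Pre_ guarantees the keys are present (else KeyError)
    let heading := ((PySem.Dict.ofList sect).get? "heading").getD ""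
    let content := ((PySem.Dict.ofList sect).get? "content").getD ""
    let words := PySem.Str.split₀ content
    (PySem.List.pyRange 0 (PySem.List.len words) max_chunk_size).foldl
      (fun chunks i =>
        chunks ++ [heading ++ "\n" ++
          PySem.Str.join " " (PySem.List.slice words (some i) (some (i + max_chunk_size)))])
      chunks) []

-- ===== PORT B =====
def chunk_by_headings_alt (data : List (List (String × String))) (max_chunk_size : Int) : List String :=
  -- Python B raises ValueError when max_chunk_size ≤ 0; that region lies outside Pre_
  if max_chunk_size ≤ 0 then []
  else
    data.foldl (fun chunks sect =>
      let heading := ((PySem.Dict.ofList sect).get? "heading").getD ""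
      let st := (PySem.Str.split₀ (((PySem.Dict.ofList sect).get? "content").getD "")).foldl
        (fun (st : List String × List String) (word : String) =>
          let buf := st.2 ++ [word]
          if PySem.List.len buf = max_chunk_size then
            (st.1 ++ [heading ++ "\n" ++ PySem.Str.join " " buf], [])
          else (st.1, buf))
        (chunks, [])
      if st.2.isEmpty then st.1 else st.1 ++ [heading ++ "\n" ++ PySem.Str.join " " st.2]) []

-- ===== PRECONDITION & SPEC =====
-- Pre_ excludes max_chunk_size ≤ 0 — at 0 A raises ValueError (range step 0), and for negative
-- values A returns [] only as an artefact of range(0, n, negative) being empty, while B raises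
-- ValueError there — and sections missing a "heading"/"content" key, on which A raises KeyError.
def Pre_chunk_by_headings (data : List (List (String × String))) (max_chunk_size : Int) : Prop :=
  1 ≤ max_chunk_size ∧ ∀ sect ∈ data,
    ((PySem.Dict.ofList sect).get? "heading").isSome ∧
    ((PySem.Dict.ofList sect).get? "content").isSome
instance (data : List (List (String × String))) (max_chunk_size : Int) : Decidable (Pre_chunk_by_headings data max_chunk_size) := by unfold Pre_chunk_by_headings; infer_instance

def pvWitness_chunk_by_headings : (List (List (String × String))) × Int :=
  ([[("heading", "Intro"), ("content", "a b c d e")], [("heading", "End"), ("content", "")]], 2)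

def Spec_chunk_by_headings (data : List (List (String × String))) (max_chunk_size : Int) (out : List String) : Prop := out = chunk_by_headings_alt data max_chunk_size
instance (data : List (List (String × String))) (max_chunk_size : Int) (out : List String) : Decidable (Spec_chunk_by_headings data max_chunk_size out) := by unfold Spec_chunk_by_headings; infer_instance

-- ===== CLAIM (what is proved, stated in full; the proofs are below) =====
def Claim_equal_chunk_by_headings : Prop := ∀ (data : List (List (String × String))) (max_chunk_size : Int), Dom_chunk_by_headings data max_chunk_size → Pre_chunk_by_headings data max_chunk_size → Spec_chunk_by_headings data max_chunk_size (chunk_by_headings data max_chunk_size)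

-- ===== LEMMAS AND PROOFS =====

def chunksOf (K : Nat) : List String → List (List String)
  | [] => []
  | w :: ws => (w :: ws).take K :: chunksOf K (ws.drop (K - 1))
termination_by ws => ws.length
decreasing_by simp

@[simp] lemma chunksOf_nil (K : Nat) : chunksOf K [] = [] := by unfold chunksOf; rfl

lemma chunksOf_cons (K : Nat) (hK : 1 ≤ K) (w : String) (ws : List String) :
    chunksOf K (w :: ws) = (w :: ws).take K :: chunksOf K ((w :: ws).drop K) := by
  conv_lhs => rw [chunksOf.eq_def]
  obtain ⟨K', rfl⟩ : ∃ K', K = K' + 1 := ⟨K - 1, by omega⟩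
  simp

lemma pyRange_zero_cons (k n : Int) (hk : 0 < k) (hn : 0 < n) :
    PySem.List.pyRange 0 n k = 0 :: PySem.List.pyRange k n k := by
  rw [PySem.List.pyRange_of_pos _ _ hk, PySem.List.pyRange_of_pos _ _ hk]
  have h1 : (n - 0 + k - 1) / k = (n - 1) / k + 1 := by
    rw [show n - 0 + k - 1 = (n - 1) + 1 * k by ring, Int.add_mul_ediv_right _ _ (by omega)]
  have h2 : 0 ≤ (n - 1) / k := Int.ediv_nonneg (by omega) (by omega)
  rw [if_pos hn, h1, show ((n - 1) / k + 1).toNat = ((n - 1) / k).toNat + 1 by omega,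
    List.range_succ_eq_map]
  by_cases hkn : k < n
  · rw [if_pos hkn]
    have he : (n - k + k - 1) / k = (n - 1) / k := by congr 1; ring
    rw [he, List.map_cons, List.map_map]
    refine congrArg₂ _ (by ring) (List.map_congr_left fun a _ => ?_)
    simp [Function.comp]
    ring
  · rw [if_neg hkn]
    have he : (n - 1) / k = 0 := Int.ediv_eq_zero_of_lt (by omega) (by omega)
    simp [he]

lemma pyRange_shift (k n : Int) (hk : 0 < k) :
    PySem.List.pyRange k n k = (PySem.List.pyRange 0 (n - k) k).map (· + k) := by
  rw [PySem.List.pyRange_of_pos _ _ hk, PySem.List.pyRange_of_pos _ _ hk, List.map_map]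
  have hif : (if 0 < n - k then ((n - k - 0 + k - 1) / k).toNat else 0)
      = (if k < n then ((n - k + k - 1) / k).toNat else 0) := by
    by_cases h : k < n
    · rw [if_pos (by omega), if_pos h]
      congr 2
      ring
    · rw [if_neg (by omega), if_neg h]
  rw [hif]
  exact List.map_congr_left fun a _ => by simp [Function.comp]; ring

lemma pyRange_nonpos (k n : Int) (hk : 0 < k) (hn : n ≤ 0) :
    PySem.List.pyRange 0 n k = [] := by
  rw [PySem.List.pyRange_of_pos _ _ hk, if_neg (by omega)]
  simp

lemma afold' (k : Int) (hk : 1 ≤ k) (f : List String → String) (N : Nat) :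
    ∀ (ws : List String), ws.length ≤ N → ∀ (acc : List String),
    (PySem.List.pyRange 0 (PySem.List.len ws) k).foldl
      (fun c i => c ++ [f ((ws.drop i.toNat).take k.toNat)]) acc
    = acc ++ (chunksOf k.toNat ws).map f := by
  induction N with
  | zero =>
    intro ws hws acc
    have h0 : ws = [] := by cases ws <;> simp_all
    subst h0
    rw [show PySem.List.len ([] : List String) = 0 from by simp [PySem.List.len_eq],
      pyRange_nonpos k 0 (by omega) (by omega)]
    simp
  | succ N ih =>
    intro ws hws acc
    cases hws0 : ws with
    | nil =>
      rw [show PySem.List.len ([] : List String) = 0 from by simp [PySem.List.len_eq],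
        pyRange_nonpos k 0 (by omega) (by omega)]
      simp
    | cons w tws =>
      subst hws0
      rw [PySem.List.len_eq]
      rw [pyRange_zero_cons _ _ (by omega) (by exact_mod_cast Nat.succ_pos tws.length), List.foldl_cons,
        pyRange_shift _ _ (by omega), List.foldl_map]
      have hbody : ∀ (c : List String),
          ∀ i ∈ PySem.List.pyRange 0 (((w :: tws).length : Int) - k) k,
          c ++ [f (((w :: tws).drop (i + k).toNat).take k.toNat)]
          = c ++ [f ((((w :: tws).drop k.toNat).drop i.toNat).take k.toNat)] := by
        intro c i hi
        have hi0 : 0 ≤ i := ((PySem.List.mem_pyRange_iff_of_pos (by omega) i).mp hi).1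
        rw [show (i + k).toNat = k.toNat + i.toNat by omega, ← List.drop_drop]
      rw [PySem.List.foldl_congr_mem _ _ _ _ hbody]
      by_cases hc : ((w :: tws).length : Int) ≤ k
      · -- one (final) chunk: the remaining range is empty and the tail is dropped entirely
        have hnil : (w :: tws).drop k.toNat = [] := List.drop_eq_nil_of_le (by omega)
        rw [pyRange_nonpos k _ (by omega) (by omega), chunksOf_cons _ (by omega), hnil]
        simp
      · have hlen : ((w :: tws).length : Int) - k
            = PySem.List.len ((w :: tws).drop k.toNat) := by
          rw [PySem.List.len_eq, List.length_drop]
          simp only [List.length_cons] at hc ⊢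
          push_cast
          omega
        rw [hlen, ih ((w :: tws).drop k.toNat)
            (by rw [List.length_drop]; simp only [List.length_cons] at hws ⊢; omega) _,
          chunksOf_cons _ (by omega)]
        simp

lemma bfold (k : Int) (hk : 1 ≤ k) (f : List String → String) :
    ∀ (ws buf acc : List String), (buf.length : Int) < k →
    (let st := ws.foldl
        (fun (st : List String × List String) (w : String) =>
          let b := st.2 ++ [w]
          if PySem.List.len b = k then (st.1 ++ [f b], ([] : List String)) else (st.1, b))
        (acc, buf)
     if st.2.isEmpty then st.1 else st.1 ++ [f st.2])
    = acc ++ (chunksOf k.toNat (buf ++ ws)).map f := by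
  intro ws
  induction ws with
  | nil =>
    intro buf acc hbuf
    cases hb : buf with
    | nil => simp
    | cons b bs =>
      subst hb
      simp only [List.foldl_nil, List.append_nil]
      rw [chunksOf_cons _ (by omega)]
      have h1 : (b :: bs).take k.toNat = b :: bs := List.take_of_length_le (by
        simp only [List.length_cons] at hbuf ⊢; omega)
      have h2 : (b :: bs).drop k.toNat = [] := List.drop_eq_nil_of_le (by
        simp only [List.length_cons] at hbuf ⊢; omega)
      simp [h1, h2]
  | cons w tws ih =>
    intro buf acc hbuf
    simp only [List.foldl_cons]
    by_cases hfull : PySem.List.len (buf ++ [w]) = k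
    · rw [if_pos hfull]
      have hstep := ih [] (acc ++ [f (buf ++ [w])]) (by simp; omega)
      simp only [List.nil_append] at hstep
      rw [hstep]
      have hlenb : (buf ++ [w]).length = k.toNat := by
        rw [PySem.List.len_eq] at hfull
        simp only [List.length_append, List.length_cons, List.length_nil] at hfull ⊢
        omega
      have hchunk : chunksOf k.toNat (buf ++ w :: tws)
          = (buf ++ [w]) :: chunksOf k.toNat tws := by
        rw [show buf ++ w :: tws = (buf ++ [w]) ++ tws from by simp]
        cases hbw : buf ++ [w] with
        | nil => simp at hbw
        | cons x xs =>
          have hl : (x :: xs).length = k.toNat := hbw ▸ hlenb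
          rw [show (x :: xs) ++ tws = x :: (xs ++ tws) from by simp,
            chunksOf_cons _ (by omega),
            show x :: (xs ++ tws) = (x :: xs) ++ tws from by simp,
            List.take_left' hl, List.drop_left' hl]
      rw [hchunk]
      simp
    · rw [if_neg hfull]
      have hlt : ((buf ++ [w]).length : Int) < k := by
        rw [PySem.List.len_eq] at hfull
        simp only [List.length_append, List.length_cons, List.length_nil] at hfull ⊢
        omega
      have hstep := ih (buf ++ [w]) acc hlt
      rw [hstep]
      simp

lemma body_eq (k : Int) (hk : 1 ≤ k) :
    ∀ (data : List (List (String × String))) (acc : List String),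
    data.foldl (fun chunks sect =>
      let heading := ((PySem.Dict.ofList sect).get? "heading").getD ""
      let content := ((PySem.Dict.ofList sect).get? "content").getD ""
      let words := PySem.Str.split₀ content
      (PySem.List.pyRange 0 (PySem.List.len words) k).foldl
        (fun chunks i =>
          chunks ++ [heading ++ "\n" ++
            PySem.Str.join " " (PySem.List.slice words (some i) (some (i + k)))])
        chunks) acc
    = data.foldl (fun chunks sect =>
      let heading := ((PySem.Dict.ofList sect).get? "heading").getD ""
      let st := (PySem.Str.split₀ (((PySem.Dict.ofList sect).get? "content").getD "")).foldl
        (fun (st : List String × List String) (word : String) =>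
          let buf := st.2 ++ [word]
          if PySem.List.len buf = k then
            (st.1 ++ [heading ++ "\n" ++ PySem.Str.join " " buf], [])
          else (st.1, buf))
        (chunks, [])
      if st.2.isEmpty then st.1 else st.1 ++ [heading ++ "\n" ++ PySem.Str.join " " st.2]) acc := by
  intro data
  induction data with
  | nil => intro acc; rfl
  | cons sect rest ih =>
    intro acc
    simp only [List.foldl_cons]
    rw [← ih]
    congr 1
    set heading := ((PySem.Dict.ofList sect).get? "heading").getD "" with hh
    set words := PySem.Str.split₀ (((PySem.Dict.ofList sect).get? "content").getD "") with hw
    have hbody : ∀ (c : List String), ∀ i ∈ PySem.List.pyRange 0 (PySem.List.len words) k,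
        c ++ [heading ++ "\n" ++
          PySem.Str.join " " (PySem.List.slice words (some i) (some (i + k)))]
        = c ++ [(fun g => heading ++ "\n" ++ PySem.Str.join " " g)
            ((words.drop i.toNat).take k.toNat)] := by
      intro c i hi
      have hi0 : 0 ≤ i := ((PySem.List.mem_pyRange_iff_of_pos (by omega) i).mp hi).1
      rw [PySem.List.slice_toNat words (a := i) (b := i + k) hi0 (by omega),
        show (i + k).toNat - i.toNat = k.toNat from by omega]
    have hA := PySem.List.foldl_congr_mem (PySem.List.pyRange 0 (PySem.List.len words) k) _ _ acc
      (fun c i hi => hbody c i hi)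
    rw [hA, afold' k hk (fun g => heading ++ "\n" ++ PySem.Str.join " " g) words.length words
      (le_refl _) acc]
    have hB := bfold k hk (fun g => heading ++ "\n" ++ PySem.Str.join " " g) words [] acc
      (by simp; omega)
    simp only [List.nil_append] at hB
    rw [← hB]

-- ===== VERDICT (by name: the statement is the Claim_ definition above) =====
theorem chunk_by_headings_spec : Claim_equal_chunk_by_headings := by
  intro data k _hdom hpre
  obtain ⟨hk, _⟩ := hpre
  unfold Spec_chunk_by_headings chunk_by_headings chunk_by_headings_alt
  rw [if_neg (by omega)]
  exact body_eq k hk data []
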